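-- pv_equiv track=rewrite | github.com/Koweiyi/oi_problems | leetcode/biweekly/b47/lc1781.py | beautySum
-- ===== SOURCE A (Python) =====
-- from collections import Counter
--
-- def beautySum(s: str) -> int:
--     res = 0
--     for i in range(len(s)):
--         cnt = Counter()
--         for j in range(i, len(s)):
--             cnt[s[j]] += 1
--             res += max(cnt.values()) - min(cnt.values())
--     return res
-- ===== SOURCE B (Python) =====
-- def beautySum(s: str) -> int:
--     n = len(s)
--     res = 0
--     for i in range(n):
--         counts = {}
--         bucket = {}
--         mx = 0
--         mn = 0
--         for j in range(i, n):
--             c = s[j]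
--             k = counts.get(c, 0)
--             counts[c] = k + 1
--             if k > 0:
--                 bucket[k] = bucket.get(k, 0) - 1
--             bucket[k + 1] = bucket.get(k + 1, 0) + 1
--             if k + 1 > mx:
--                 mx = k + 1
--             if k == 0:
--                 mn = 1
--             elif k == mn and bucket[k] == 0:
--                 mn = k + 1
--             res += mx - mn
--     return res
-- ===== Notes on version B (the rewrite author's own statement) =====
-- stated objective: faster
-- what changed: instead of rebuilding cnt.values() and rescanning it twice with max()/min() after every one-character extension, B maintains the running max and min incrementally using a count-of-counts bucket dict, O(1) work per extension
import Mathlib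
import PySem

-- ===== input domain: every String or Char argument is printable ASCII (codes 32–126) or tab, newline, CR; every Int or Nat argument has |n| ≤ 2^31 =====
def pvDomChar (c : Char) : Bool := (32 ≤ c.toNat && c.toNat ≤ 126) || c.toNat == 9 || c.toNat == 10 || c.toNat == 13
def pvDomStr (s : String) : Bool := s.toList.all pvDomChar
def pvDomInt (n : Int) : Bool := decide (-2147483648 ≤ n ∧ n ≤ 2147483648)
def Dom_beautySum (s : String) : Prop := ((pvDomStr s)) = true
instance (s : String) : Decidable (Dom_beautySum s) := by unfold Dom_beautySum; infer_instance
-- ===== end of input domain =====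

-- B replaces A's rescan of max(cnt.values())/min(cnt.values()) after every one-character extension
-- by incrementally maintained max/min with a count-of-counts bucket dict (objective: faster, constant-factor).

-- ===== PORT A =====
-- one inner-loop step of A: cnt[s[j]] += 1; res += max(cnt.values()) - min(cnt.values())
-- (.getD 0 on max?/min? is a totalizing guard only: cnt is never empty when they are read)
def pvStepA (st : PySem.Dict Char Int × Int) (c : Char) : PySem.Dict Char Int × Int :=
  let cnt := st.1.modify c 0 (· + 1)
  (cnt, st.2 + ((PySem.List.max? cnt.values (fun y => y)).getD 0
                - (PySem.List.min? cnt.values (fun y => y)).getD 0))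

def beautySum (s : String) : Int :=
  let cs := s.toList
  let n := PySem.List.len cs
  (PySem.List.pyRange 0 n 1).foldl
    (fun res i =>
      ((PySem.List.pyRange i n 1).foldl
          (fun st j => pvStepA st (PySem.List.pyGetD cs j ' '))
          (PySem.Dict.empty, res)).2)
    0

-- ===== PORT B =====
-- one inner-loop step of B: state (counts, bucket, mx, mn, res)
def pvStepB (st : PySem.Dict Char Int × PySem.Dict Int Int × Int × Int × Int) (c : Char) :
    PySem.Dict Char Int × PySem.Dict Int Int × Int × Int × Int :=
  match st with
  | (counts, bucket, mx, mn, res) =>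
    let k := counts.getD c 0
    let counts := counts.insert c (k + 1)
    let bucket := if k > 0 then bucket.insert k (bucket.getD k 0 - 1) else bucket
    let bucket := bucket.insert (k + 1) (bucket.getD (k + 1) 0 + 1)
    let mx := if k + 1 > mx then k + 1 else mx
    let mn := if k = 0 then 1 else if k = mn ∧ bucket.getD k 0 = 0 then k + 1 else mn
    (counts, bucket, mx, mn, res + (mx - mn))

def beautySum_alt (s : String) : Int :=
  let cs := s.toList
  let n := PySem.List.len cs
  (PySem.List.pyRange 0 n 1).foldl
    (fun res i =>
      ((PySem.List.pyRange i n 1).foldl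
          (fun st j => pvStepB st (PySem.List.pyGetD cs j ' '))
          (PySem.Dict.empty, PySem.Dict.empty, 0, 0, res)).2.2.2.2)
    0

-- ===== PRECONDITION & SPEC =====
def Spec_beautySum (s : String) (out : Int) : Prop := out = beautySum_alt s
instance (s : String) (out : Int) : Decidable (Spec_beautySum s out) := by unfold Spec_beautySum; infer_instance

-- ===== CLAIM (what is proved, stated in full; the proofs are below) =====
def Claim_equal_beautySum : Prop := ∀ (s : String), Dom_beautySum s → Spec_beautySum s (beautySum s)

-- ===== LEMMAS AND PROOFS =====

-- the multiset of character counts of l, as the values list of Counter(l)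
def pvVals (l : List Char) : List Int :=
  (PySem.Set.ofList l).map (fun c => ((l.count c : Nat) : Int))

theorem pvVals_values (l : List Char) : (PySem.Dict.counter l).values = pvVals l := by
  simp [pvVals, PySem.Dict.values, PySem.Dict.items_counter]

theorem mem_pvVals (m : List Char) (y : Int) :
    y ∈ pvVals m ↔ ∃ x, x ∈ m ∧ ((m.count x : Nat) : Int) = y := by
  simp [pvVals, List.mem_map, PySem.Set.mem_ofList]

theorem pvVals_pos (m : List Char) (y : Int) (hy : y ∈ pvVals m) : 1 ≤ y := by
  rcases (mem_pvVals m y).mp hy with ⟨x, hx, rfl⟩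
  have := List.count_pos_iff.mpr hx
  omega

theorem pv_max?_eq (xs : List Int) (m : Int) (hm : m ∈ xs) (hub : ∀ y ∈ xs, y ≤ m) :
    PySem.List.max? xs (fun y => y) = some m := by
  cases h : PySem.List.max? xs (fun y => y) with
  | none => rw [PySem.List.max?_eq_none_iff] at h; subst h; simp at hm
  | some m' =>
    have h1 := PySem.List.max?_isMax h m hm
    have h2 := hub m' (PySem.List.max?_mem h)
    simp only [Option.some.injEq]
    omega

theorem pv_min?_eq (xs : List Int) (m : Int) (hm : m ∈ xs) (hlb : ∀ y ∈ xs, m ≤ y) :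
    PySem.List.min? xs (fun y => y) = some m := by
  cases h : PySem.List.min? xs (fun y => y) with
  | none => rw [PySem.List.min?_eq_none_iff] at h; subst h; simp at hm
  | some m' =>
    have h1 := PySem.List.min?_isMin h m hm
    have h2 := hlb m' (PySem.List.min?_mem h)
    simp only [Option.some.injEq]
    omega

theorem pv_cnt_map (S : List Char) (f : Char → Int) (v : Int) :
    (S.map f).count v = S.countP (fun x => f x == v) := by
  induction S with
  | nil => rfl
  | cons a t ih => simp only [List.map_cons, List.count_cons, List.countP_cons, ih]

theorem pv_countP_update (S : List Char) (hn : S.Nodup) (c : Char) (hc : c ∈ S)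
    (p q : Char → Bool) (hpq : ∀ x ∈ S, x ≠ c → q x = p x) :
    (S.countP q : Int) = (S.countP p : Int)
      - (if p c then 1 else 0) + (if q c then 1 else 0) := by
  induction S with
  | nil => cases hc
  | cons a t ih =>
    rw [List.countP_cons, List.countP_cons]
    by_cases hac : a = c
    · subst hac
      have hnt : a ∉ t := (List.nodup_cons.mp hn).1
      have ht : t.countP q = t.countP p := by
        apply List.countP_congr
        intro x hx
        rw [hpq x (List.mem_cons_of_mem _ hx) (fun h => hnt (h ▸ hx))]
      rw [ht]
      by_cases hp : p a <;> by_cases hq : q a <;> simp [hp, hq]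
    · have hqa : q a = p a := hpq a List.mem_cons_self hac
      have hct : c ∈ t := (List.mem_cons.mp hc).resolve_left (fun h => hac h.symm)
      have := ih (List.nodup_cons.mp hn).2 hct
        (fun x hx hxc => hpq x (List.mem_cons_of_mem _ hx) hxc)
      rw [hqa]
      push_cast
      push_cast at this
      omega

theorem pv_ofList_append (l : List Char) (c : Char) :
    PySem.Set.ofList (l ++ [c]) = PySem.Set.add (PySem.Set.ofList l) c := by
  rw [PySem.Set.ofList_eq_foldl, PySem.Set.ofList_eq_foldl, List.foldl_append]
  rfl

theorem pv_count_append (l : List Char) (c x : Char) :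
    (l ++ [c]).count x = l.count x + (if c = x then 1 else 0) := by
  simp [List.count_append, List.count_singleton]

theorem pvVals_append_not_mem (l : List Char) (c : Char) (hc : c ∉ l) :
    pvVals (l ++ [c]) = pvVals l ++ [1] := by
  have hadd : PySem.Set.add (PySem.Set.ofList l) c = PySem.Set.ofList l ++ [c] := by
    simp only [PySem.Set.add]
    rw [if_neg]
    simp [PySem.Set.contains, PySem.Set.mem_ofList, hc]
  unfold pvVals
  rw [pv_ofList_append, hadd, List.map_append]
  congr 1
  · apply List.map_congr_left
    intro x hx
    have hxl : x ∈ l := (PySem.Set.mem_ofList l x).mp hx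
    rw [pv_count_append, if_neg (fun h : c = x => hc (h ▸ hxl))]
    simp
  · simp [List.count_eq_zero.mpr hc]

theorem pvVals_count_append_mem (l : List Char) (c : Char) (hc : c ∈ l) (v : Int) :
    ((pvVals (l ++ [c])).count v : Int)
      = ((pvVals l).count v : Int)
        - (if (l.count c : Int) = v then 1 else 0)
        + (if (l.count c : Int) + 1 = v then 1 else 0) := by
  have hadd : PySem.Set.add (PySem.Set.ofList l) c = PySem.Set.ofList l := by
    simp only [PySem.Set.add]
    rw [if_pos]
    simp [PySem.Set.contains, PySem.Set.mem_ofList, hc]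
  unfold pvVals
  rw [pv_ofList_append, hadd, pv_cnt_map, pv_cnt_map]
  have hpq : ∀ x ∈ PySem.Set.ofList l, x ≠ c →
      ((((l ++ [c]).count x : Nat) : Int) == v) = (((l.count x : Nat) : Int) == v) := by
    intro x hx hxc
    rw [pv_count_append, if_neg (fun h : c = x => hxc h.symm)]
    simp
  have := pv_countP_update (PySem.Set.ofList l) (PySem.Set.nodup_ofList l) c
    ((PySem.Set.mem_ofList l c).mpr hc)
    (fun x => ((l.count x : Nat) : Int) == v)
    (fun x => (((l ++ [c]).count x : Nat) : Int) == v)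
    hpq
  rw [this]
  have hcc : (l ++ [c]).count c = l.count c + 1 := by rw [pv_count_append, if_pos rfl]
  simp only [hcc]
  by_cases h1 : (l.count c : Int) = v <;> by_cases h2 : (l.count c : Int) + 1 = v <;>
    simp [h1, h2]

theorem pv_step (l : List Char) (c : Char) (bucket bucket1 bucket2 : PySem.Dict Int Int)
    (mx mn k mx' mn' : Int)
    (hk : k = (l.count c : Int))
    (hb1 : bucket1 = if k > 0 then bucket.insert k (bucket.getD k 0 - 1) else bucket)
    (hb2 : bucket2 = bucket1.insert (k + 1) (bucket1.getD (k + 1) 0 + 1))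
    (hmx : mx' = if k + 1 > mx then k + 1 else mx)
    (hmn : mn' = if k = 0 then 1 else if k = mn ∧ bucket2.getD k 0 = 0 then k + 1 else mn)
    (h3 : ∀ v : Int, bucket.getD v 0 = ((pvVals l).count v : Int))
    (h4 : l = [] → mx = 0 ∧ mn = 0)
    (h5 : l ≠ [] → PySem.List.max? (pvVals l) (fun y => y) = some mx
                 ∧ PySem.List.min? (pvVals l) (fun y => y) = some mn) :
    (∀ v : Int, bucket2.getD v 0 = ((pvVals (l ++ [c])).count v : Int)) ∧
    PySem.List.max? (pvVals (l ++ [c])) (fun y => y) = some mx' ∧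
    PySem.List.min? (pvVals (l ++ [c])) (fun y => y) = some mn' := by
  have hcpl : (l ++ [c]).count c = l.count c + 1 := by rw [pv_count_append, if_pos rfl]
  have hcx : ∀ x, x ≠ c → (l ++ [c]).count x = l.count x := by
    intro x hx
    rw [pv_count_append, if_neg (fun h : c = x => hx h.symm)]
    omega
  have hknn : 0 ≤ k := by omega
  -- the bucket after the two updates, as a formula over the old counts-of-counts
  have hb2v : ∀ v : Int, bucket2.getD v 0 =
      ((pvVals l).count v : Int)
        - (if v = k ∧ 0 < k then 1 else 0) + (if v = k + 1 then 1 else 0) := by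
    intro v
    rw [hb2, PySem.Dict.getD_insert, hb1]
    by_cases hv1 : v = k + 1
    · subst hv1
      by_cases hkpos : k > 0
      · simp [if_pos hkpos, PySem.Dict.getD_insert, h3]
      · simp [if_neg hkpos, h3]
    · by_cases hvk : v = k ∧ 0 < k
      · obtain ⟨hvk', hkpos⟩ := hvk
        subst hvk'
        simp [if_pos (by omega : v > 0), h3]
      · by_cases hkpos : k > 0
        · have hvk' : ¬ (v = k) := fun h => hvk ⟨h, hkpos⟩
          simp [if_pos hkpos, PySem.Dict.getD_insert, h3, if_neg hv1, if_neg hvk',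
            if_neg hvk]
        · simp [if_neg hkpos, h3, if_neg hv1, if_neg hvk]
  -- the new counts-of-counts
  have hBC : ∀ v : Int, bucket2.getD v 0 = ((pvVals (l ++ [c])).count v : Int) := by
    intro v
    rw [hb2v v]
    by_cases hcl : c ∈ l
    · have hkpos : 0 < k := by
        have := List.count_pos_iff.mpr hcl
        omega
      rw [pvVals_count_append_mem l c hcl v, ← hk]
      split_ifs <;> omega
    · have hk0 : k = 0 := by
        have := List.count_eq_zero.mpr hcl
        omega
      rw [pvVals_append_not_mem l c hcl]
      have : ((pvVals l ++ [1]).count v : Int) = ((pvVals l).count v : Int)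
          + (if (1 : Int) = v then 1 else 0) := by
        rw [List.count_append, List.count_singleton]
        simp only [beq_iff_eq]
        split_ifs <;> push_cast <;> omega
      rw [this, hk0]
      split_ifs <;> omega
  refine ⟨hBC, ?_⟩
  by_cases hcl : c ∈ l
  -- ============ case c ∈ l ============
  · have hlnil : l ≠ [] := List.ne_nil_of_mem hcl
    obtain ⟨hmax, hmin⟩ := h5 hlnil
    have hub : ∀ y ∈ pvVals l, y ≤ mx := fun y hy => PySem.List.max?_isMax hmax y hy
    have hlb : ∀ y ∈ pvVals l, mn ≤ y := fun y hy => PySem.List.min?_isMin hmin y hy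
    have hmxmem : mx ∈ pvVals l := PySem.List.max?_mem hmax
    have hmnmem : mn ∈ pvVals l := PySem.List.min?_mem hmin
    have hkmem : k ∈ pvVals l := (mem_pvVals l k).mpr ⟨c, hcl, hk.symm⟩
    have hkpos : 0 < k := by
      have := List.count_pos_iff.mpr hcl
      omega
    have hkmx : k ≤ mx := hub k hkmem
    have hmnk : mn ≤ k := hlb k hkmem
    have hK1mem : k + 1 ∈ pvVals (l ++ [c]) :=
      (mem_pvVals _ (k + 1)).mpr ⟨c, by simp, by rw [hcpl]; push_cast; omega⟩
    have hsplit : ∀ y ∈ pvVals (l ++ [c]), y = k + 1 ∨ y ∈ pvVals l := by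
      intro y hy
      rcases (mem_pvVals _ y).mp hy with ⟨x, hx, rfl⟩
      by_cases hxc : x = c
      · subst hxc; left; rw [hcpl]; push_cast; omega
      · right
        have hxl : x ∈ l := by
          rcases List.mem_append.mp hx with h | h
          · exact h
          · exact absurd (List.mem_singleton.mp h) hxc
        exact (mem_pvVals l _).mpr ⟨x, hxl, by rw [hcx x hxc]⟩
    have hkeep : ∀ x ∈ l, x ≠ c → ((l.count x : Nat) : Int) ∈ pvVals (l ++ [c]) := by
      intro x hxl hxc
      exact (mem_pvVals _ _).mpr ⟨x, List.mem_append_left _ hxl, by rw [hcx x hxc]⟩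
    constructor
    · -- max
      apply pv_max?_eq
      · rw [hmx]
        by_cases hgt : k + 1 > mx
        · simp only [if_pos hgt]; exact hK1mem
        · simp only [if_neg hgt]
          rcases (mem_pvVals l mx).mp hmxmem with ⟨x, hxl, hxc⟩
          have hxne : x ≠ c := by
            intro h; subst h
            rw [← hk] at hxc
            omega
          rw [← hxc]
          exact hkeep x hxl hxne
      · intro y hy
        rcases hsplit y hy with rfl | hyl
        · rw [hmx]; split_ifs <;> omega
        · have := hub y hyl
          rw [hmx]; split_ifs <;> omega
    · -- min
      have hkne0 : ¬ (k = 0) := by omega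
      rw [hmn, if_neg hkne0]
      by_cases hcond : k = mn ∧ bucket2.getD k 0 = 0
      · rw [if_pos hcond]
        have hnok : k ∉ pvVals (l ++ [c]) := by
          have h0 := hcond.2
          rw [hBC k] at h0
          intro hmem
          have := List.count_pos_iff.mpr hmem
          omega
        apply pv_min?_eq _ _ hK1mem
        intro y hy
        rcases hsplit y hy with rfl | hyl
        · omega
        · have h1 := hlb y hyl
          have h2 : y ≠ k := fun h => hnok (h ▸ hy)
          omega
      · rw [if_neg hcond]
        have hmem' : mn ∈ pvVals (l ++ [c]) := by
          by_cases hkmn : k = mn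
          · have hne0 : bucket2.getD k 0 ≠ 0 := fun h => hcond ⟨hkmn, h⟩
            rw [hBC k] at hne0
            have : k ∈ pvVals (l ++ [c]) := by
              rcases Nat.eq_zero_or_pos ((pvVals (l ++ [c])).count k) with h | h
              · exact absurd (by exact_mod_cast h) hne0
              · exact List.count_pos_iff.mp h
            exact hkmn ▸ this
          · rcases (mem_pvVals l mn).mp hmnmem with ⟨x, hxl, hxc⟩
            have hxne : x ≠ c := by
              intro h; subst h
              rw [← hk] at hxc
              exact hkmn hxc
            rw [← hxc]
            exact hkeep x hxl hxne
        apply pv_min?_eq _ _ hmem'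
        intro y hy
        rcases hsplit y hy with rfl | hyl
        · omega
        · exact hlb y hyl
  -- ============ case c ∉ l ============
  · have hk0 : k = 0 := by
      have := List.count_eq_zero.mpr hcl
      omega
    have hvals' : pvVals (l ++ [c]) = pvVals l ++ [1] := pvVals_append_not_mem l c hcl
    have hmn1 : mn' = 1 := by rw [hmn, if_pos hk0]
    by_cases hlnil : l = []
    · subst hlnil
      have hnil : pvVals ([] : List Char) = [] := rfl
      obtain ⟨hmx0, hmn0⟩ := h4 rfl
      have hmx1 : mx' = 1 := by rw [hmx, hk0, hmx0]; norm_num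
      rw [hvals', hnil, hmx1, hmn1]
      constructor
      · apply pv_max?_eq _ _ (by simp)
        intro y hy
        simp at hy
        omega
      · apply pv_min?_eq _ _ (by simp)
        intro y hy
        simp at hy
        omega
    · obtain ⟨hmax, hmin⟩ := h5 hlnil
      have hub : ∀ y ∈ pvVals l, y ≤ mx := fun y hy => PySem.List.max?_isMax hmax y hy
      have hmxmem : mx ∈ pvVals l := PySem.List.max?_mem hmax
      have hmx1 : 1 ≤ mx := pvVals_pos l mx hmxmem
      have hmxeq : mx' = mx := by
        rw [hmx, hk0, if_neg (by omega : ¬ ((0 : Int) + 1 > mx))]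
      rw [hvals', hmxeq, hmn1]
      constructor
      · apply pv_max?_eq _ _ (List.mem_append_left _ hmxmem)
        intro y hy
        rcases List.mem_append.mp hy with h | h
        · exact hub y h
        · have := List.mem_singleton.mp h
          omega
      · apply pv_min?_eq _ _ (List.mem_append_right _ (by simp))
        intro y hy
        rcases List.mem_append.mp hy with h | h
        · exact pvVals_pos l y h
        · have := List.mem_singleton.mp h
          omega

theorem pv_inner (t l : List Char) (cnt counts : PySem.Dict Char Int)
    (bucket : PySem.Dict Int Int) (mx mn res : Int)
    (h1 : cnt = PySem.Dict.counter l)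
    (h2 : ∀ x : Char, counts.getD x 0 = (l.count x : Int))
    (h3 : ∀ v : Int, bucket.getD v 0 = ((pvVals l).count v : Int))
    (h4 : l = [] → mx = 0 ∧ mn = 0)
    (h5 : l ≠ [] → PySem.List.max? (pvVals l) (fun y => y) = some mx
                 ∧ PySem.List.min? (pvVals l) (fun y => y) = some mn) :
    (t.foldl pvStepA (cnt, res)).2
      = (t.foldl pvStepB (counts, bucket, mx, mn, res)).2.2.2.2 := by
  induction t generalizing l cnt counts bucket mx mn res with
  | nil => rfl
  | cons c t ih =>
    subst h1
    obtain ⟨hBC, hmax', hmin'⟩ := pv_step l c bucket _ _ mx mn (counts.getD c 0) _ _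
      (h2 c) rfl rfl rfl rfl h3 h4 h5
    simp only [List.foldl_cons]
    have hcpl : (l ++ [c]).count c = l.count c + 1 := by rw [pv_count_append, if_pos rfl]
    have hA2 : (pvStepA (PySem.Dict.counter l, res) c).2
        = (pvStepB (counts, bucket, mx, mn, res) c).2.2.2.2 := by
      simp only [pvStepA, pvStepB]
      rw [← PySem.Dict.counter_append_singleton l c, pvVals_values (l ++ [c]), hmax', hmin']
      rfl
    have hB1 : ∀ x : Char, (pvStepB (counts, bucket, mx, mn, res) c).1.getD x 0
        = ((l ++ [c]).count x : Int) := by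
      intro x
      simp only [pvStepB]
      rw [PySem.Dict.getD_insert]
      by_cases hxx : x = c
      · subst hxx
        rw [if_pos rfl, h2 x, hcpl]
        push_cast; ring
      · rw [if_neg hxx, h2 x, pv_count_append, if_neg (fun h : c = x => hxx h.symm)]
        push_cast; ring
    have hB2 : ∀ v : Int, (pvStepB (counts, bucket, mx, mn, res) c).2.1.getD v 0
        = ((pvVals (l ++ [c])).count v : Int) := fun v => hBC v
    have hB3 : PySem.List.max? (pvVals (l ++ [c])) (fun y => y)
        = some (pvStepB (counts, bucket, mx, mn, res) c).2.2.1 := hmax'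
    have hB4 : PySem.List.min? (pvVals (l ++ [c])) (fun y => y)
        = some (pvStepB (counts, bucket, mx, mn, res) c).2.2.2.1 := hmin'
    have hrec := ih (l ++ [c]) (PySem.Dict.counter (l ++ [c]))
      (pvStepB (counts, bucket, mx, mn, res) c).1
      (pvStepB (counts, bucket, mx, mn, res) c).2.1
      (pvStepB (counts, bucket, mx, mn, res) c).2.2.1
      (pvStepB (counts, bucket, mx, mn, res) c).2.2.2.1
      (pvStepB (counts, bucket, mx, mn, res) c).2.2.2.2
      rfl hB1 hB2 (fun h => absurd h (by simp)) (fun _ => ⟨hB3, hB4⟩)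
    have hAeq : pvStepA (PySem.Dict.counter l, res) c
        = (PySem.Dict.counter (l ++ [c]), (pvStepB (counts, bucket, mx, mn, res) c).2.2.2.2) := by
      apply Prod.ext_iff.mpr
      constructor
      · simp only [pvStepA]
        exact (PySem.Dict.counter_append_singleton l c).symm
      · exact hA2
    rw [hAeq]
    exact hrec

-- ===== VERDICT (by name: the statement is the Claim_ definition above) =====
theorem beautySum_spec : Claim_equal_beautySum := by
  intro s _
  unfold Spec_beautySum
  simp only [beautySum, beautySum_alt]
  apply PySem.List.foldl_congr_mem
  intro res i hi
  have hi0 : 0 ≤ i := (PySem.List.mem_pyRange_one.mp hi).1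
  rw [PySem.List.foldl_pyRange_pyGetD s.toList ' ' pvStepA (PySem.Dict.empty, res) hi0,
      PySem.List.foldl_pyRange_pyGetD s.toList ' ' pvStepB
        (PySem.Dict.empty, PySem.Dict.empty, 0, 0, res) hi0]
  exact pv_inner (s.toList.drop i.toNat) [] PySem.Dict.empty PySem.Dict.empty
    PySem.Dict.empty 0 0 res rfl (fun x => by simp) (fun v => by simp [pvVals])
    (fun _ => ⟨rfl, rfl⟩) (fun h => absurd rfl h)
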